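-- pv_equiv track=rewrite | github.com/udaykiran1212/geography-quiz | app.py | get_default_image
-- ===== SOURCE A (Python) =====
-- def get_default_image(query):
--     # Return appropriate default images based on the type of location
--     query_lower = query.lower()
--     if any(word in query_lower for word in ['ocean', 'sea', 'pacific', 'atlantic']):
--         return "/static/images/ocean.jpg"
--     elif any(word in query_lower for word in ['mountain', 'mount', 'mt']):
--         return "/static/images/mountain.jpg"
--     elif any(word in query_lower for word in ['desert', 'sahara']):
--         return "/static/images/desert.jpg"
--     elif any(word in query_lower for word in ['forest', 'jungle']):
--         return "/static/images/forest.jpg"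
--     elif any(word in query_lower for word in ['city', 'capital']):
--         return "/static/images/city.jpg"
--     else:
--         return "/static/images/globe.jpg"
-- ===== SOURCE B (Python) =====
-- # Flat keyword -> category-index map; pick the smallest matched category index.
-- PATHS = [
--     "/static/images/ocean.jpg",
--     "/static/images/mountain.jpg",
--     "/static/images/desert.jpg",
--     "/static/images/forest.jpg",
--     "/static/images/city.jpg",
--     "/static/images/globe.jpg",
-- ]
--
-- KEYWORD_CATEGORY = {
--     'ocean': 0, 'sea': 0, 'pacific': 0, 'atlantic': 0,
--     'mountain': 1, 'mount': 1, 'mt': 1,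
--     'desert': 2, 'sahara': 2,
--     'forest': 3, 'jungle': 3,
--     'city': 4, 'capital': 4,
-- }
--
-- def get_default_image(query):
--     query_lower = query.lower()
--     best = min((cat for word, cat in KEYWORD_CATEGORY.items() if word in query_lower),
--                default=5)
--     return PATHS[best]
-- ===== Notes on version B (the rewrite author's own statement) =====
-- stated objective: alternative
-- what changed: Replaced the ordered if/elif chain of per-category any() scans with a flat keyword-to-category-index map: every keyword is tested once, the minimum matched category index is taken, and the path is looked up in an array; correctness holds because the first matching category in A's chain is exactly the minimum category index among all matched keywords.
import Mathlib
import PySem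

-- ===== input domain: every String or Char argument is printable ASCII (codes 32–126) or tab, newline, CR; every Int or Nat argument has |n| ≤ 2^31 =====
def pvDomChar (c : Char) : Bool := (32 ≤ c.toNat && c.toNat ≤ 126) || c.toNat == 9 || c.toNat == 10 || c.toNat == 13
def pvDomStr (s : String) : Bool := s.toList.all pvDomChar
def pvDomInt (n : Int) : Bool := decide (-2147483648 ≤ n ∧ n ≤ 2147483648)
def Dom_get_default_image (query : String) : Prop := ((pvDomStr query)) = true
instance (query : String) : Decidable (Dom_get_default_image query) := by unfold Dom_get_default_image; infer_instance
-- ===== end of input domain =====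

-- B replaces A's ordered if/elif chain of per-category scans with a flat keyword→category-index
-- map: the minimum matched category index selects the path from an array (alternative structure).

-- ===== PORT A =====
def get_default_image (query : String) : String :=
  let query_lower := PySem.Str.lower query
  if (["ocean", "sea", "pacific", "atlantic"] : List String).any (fun word => PySem.Str.isIn word query_lower) then
    "/static/images/ocean.jpg"
  else if (["mountain", "mount", "mt"] : List String).any (fun word => PySem.Str.isIn word query_lower) then
    "/static/images/mountain.jpg"
  else if (["desert", "sahara"] : List String).any (fun word => PySem.Str.isIn word query_lower) then
    "/static/images/desert.jpg"
  else if (["forest", "jungle"] : List String).any (fun word => PySem.Str.isIn word query_lower) then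
    "/static/images/forest.jpg"
  else if (["city", "capital"] : List String).any (fun word => PySem.Str.isIn word query_lower) then
    "/static/images/city.jpg"
  else
    "/static/images/globe.jpg"

-- ===== PORT B =====
def PATHS : List String :=
  [ "/static/images/ocean.jpg", "/static/images/mountain.jpg", "/static/images/desert.jpg",
    "/static/images/forest.jpg", "/static/images/city.jpg", "/static/images/globe.jpg" ]

def KEYWORD_CATEGORY : List (String × Nat) :=
  [ ("ocean", 0), ("sea", 0), ("pacific", 0), ("atlantic", 0),
    ("mountain", 1), ("mount", 1), ("mt", 1),
    ("desert", 2), ("sahara", 2),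
    ("forest", 3), ("jungle", 3),
    ("city", 4), ("capital", 4) ]

-- Python's min(xs, default=d): d when empty, else the minimum.
def pyMinD (xs : List Nat) (d : Nat) : Nat :=
  match xs with
  | [] => d
  | x :: rest => rest.foldl min x

def get_default_image_alt (query : String) : String :=
  let query_lower := PySem.Str.lower query
  let best := pyMinD ((KEYWORD_CATEGORY.filter (fun wc => PySem.Str.isIn wc.1 query_lower)).map Prod.snd) 5
  -- best ≤ 5 < PATHS.length, so Python's PATHS[best] never raises; getD's default is unreachable
  PATHS.getD best "/static/images/globe.jpg"

-- ===== PRECONDITION & SPEC =====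
def Spec_get_default_image (query : String) (out : String) : Prop := out = get_default_image_alt query
instance (query : String) (out : String) : Decidable (Spec_get_default_image query out) := by unfold Spec_get_default_image; infer_instance

-- ===== CLAIM (what is proved, stated in full; the proofs are below) =====
def Claim_equal_get_default_image : Prop := ∀ (query : String), Dom_get_default_image query → Spec_get_default_image query (get_default_image query)

-- ===== LEMMAS AND PROOFS =====

-- A's chain and B's min-category lookup, both abstracted over the 13 keyword tests.
def pvA (b1 b2 b3 b4 b5 b6 b7 b8 b9 b10 b11 b12 b13 : Bool) : String :=
  if (b1 || (b2 || (b3 || (b4 || false)))) = true then "/static/images/ocean.jpg"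
  else if (b5 || (b6 || (b7 || false))) = true then "/static/images/mountain.jpg"
  else if (b8 || (b9 || false)) = true then "/static/images/desert.jpg"
  else if (b10 || (b11 || false)) = true then "/static/images/forest.jpg"
  else if (b12 || (b13 || false)) = true then "/static/images/city.jpg"
  else "/static/images/globe.jpg"

def pvB (b1 b2 b3 b4 b5 b6 b7 b8 b9 b10 b11 b12 b13 : Bool) : String :=
  PATHS.getD (pyMinD (
    (if b1 = true then [(0 : Nat)] else []) ++ ((if b2 = true then [(0 : Nat)] else []) ++
    ((if b3 = true then [(0 : Nat)] else []) ++ ((if b4 = true then [(0 : Nat)] else []) ++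
    ((if b5 = true then [(1 : Nat)] else []) ++ ((if b6 = true then [(1 : Nat)] else []) ++
    ((if b7 = true then [(1 : Nat)] else []) ++ ((if b8 = true then [(2 : Nat)] else []) ++
    ((if b9 = true then [(2 : Nat)] else []) ++ ((if b10 = true then [(3 : Nat)] else []) ++
    ((if b11 = true then [(3 : Nat)] else []) ++ ((if b12 = true then [(4 : Nat)] else []) ++
    ((if b13 = true then [(4 : Nat)] else []) ++ ([] : List Nat))))))))))))) ) 5)
    "/static/images/globe.jpg"

-- kernel-checked table: the two abstractions agree on all 2^13 assignments
theorem pv_tab : ∀ b1 b2 b3 b4 b5 b6 b7 b8 b9 b10 b11 b12 b13 : Bool,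
    pvA b1 b2 b3 b4 b5 b6 b7 b8 b9 b10 b11 b12 b13 =
    pvB b1 b2 b3 b4 b5 b6 b7 b8 b9 b10 b11 b12 b13 := by decide

-- unfold map∘filter one cons at a time into the append-of-ifs shape of pvB
theorem pv_fmc {α β : Type} (p : α → Bool) (g : α → β) (x : α) (l : List α) :
    ((x :: l).filter p).map g = (if p x = true then [g x] else []) ++ (l.filter p).map g := by
  by_cases h : p x = true <;> simp [h]

-- ===== VERDICT (by name: the statement is the Claim_ definition above) =====
theorem get_default_image_spec : Claim_equal_get_default_image := by
  intro query _
  unfold Spec_get_default_image get_default_image get_default_image_alt KEYWORD_CATEGORY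
  simp only [List.any_cons, List.any_nil, pv_fmc, List.filter_nil, List.map_nil]
  exact pv_tab (PySem.Str.isIn "ocean" (PySem.Str.lower query))
    (PySem.Str.isIn "sea" (PySem.Str.lower query))
    (PySem.Str.isIn "pacific" (PySem.Str.lower query))
    (PySem.Str.isIn "atlantic" (PySem.Str.lower query))
    (PySem.Str.isIn "mountain" (PySem.Str.lower query))
    (PySem.Str.isIn "mount" (PySem.Str.lower query))
    (PySem.Str.isIn "mt" (PySem.Str.lower query))
    (PySem.Str.isIn "desert" (PySem.Str.lower query))
    (PySem.Str.isIn "sahara" (PySem.Str.lower query))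
    (PySem.Str.isIn "forest" (PySem.Str.lower query))
    (PySem.Str.isIn "jungle" (PySem.Str.lower query))
    (PySem.Str.isIn "city" (PySem.Str.lower query))
    (PySem.Str.isIn "capital" (PySem.Str.lower query))
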